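-- pv_equiv track=rewrite | github.com/Kirogar/James_Bot | meet_missing_child_report.py | area_matches
-- ===== SOURCE A (Python) =====
-- def area_matches(area_path: str | None, rules) -> bool:
--     if not area_path:
--         return False
--     for base, include_children in rules:
--         if area_path == base:
--             return True
--         if include_children and area_path.startswith(base + "\\"):
--             return True
--     return False
-- ===== SOURCE B (Python) =====
-- def area_matches(area_path, rules):
--     exact = set()
--     children = set()
--     for base, include_children in rules:
--         exact.add(base)
--         if include_children:
--             children.add(base)
--     if not area_path:
--         return False
--     if area_path in exact:
--         return True
--     for i, ch in enumerate(area_path):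
--         if ch == "\\" and area_path[:i] in children:
--             return True
--     return False
-- ===== Notes on version B (the rewrite author's own statement) =====
-- stated objective: alternative
-- what changed: B first indexes the rules into two sets (all bases; bases with include_children) and then scans the path's backslash positions testing each prefix against the index, instead of scanning the rules list and calling startswith per rule.
import Mathlib
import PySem

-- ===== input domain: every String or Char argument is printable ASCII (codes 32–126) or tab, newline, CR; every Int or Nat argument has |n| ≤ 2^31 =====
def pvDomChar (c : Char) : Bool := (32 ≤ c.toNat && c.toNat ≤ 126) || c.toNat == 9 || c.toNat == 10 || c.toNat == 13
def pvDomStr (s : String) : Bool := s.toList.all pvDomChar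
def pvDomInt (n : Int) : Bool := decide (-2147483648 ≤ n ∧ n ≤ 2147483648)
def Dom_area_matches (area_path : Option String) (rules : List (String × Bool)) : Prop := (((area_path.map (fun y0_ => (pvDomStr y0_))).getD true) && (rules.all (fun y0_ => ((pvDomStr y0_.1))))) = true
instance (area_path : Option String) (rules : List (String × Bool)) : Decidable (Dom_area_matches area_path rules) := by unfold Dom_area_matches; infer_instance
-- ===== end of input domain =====

-- B indexes the rules into two sets and scans the path's backslash positions instead of
-- scanning the rules list with startswith per rule; objective: alternative decomposition.

-- ===== PORT A =====
-- the `for base, include_children in rules:` loop of A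
def area_matches_loop (a : String) (rules : List (String × Bool)) : Bool :=
  match rules with
  | [] => false
  | (base, inc) :: rest =>
    if a == base then true
    else if inc && PySem.Str.startswith a (base ++ "\\") then true
    else area_matches_loop a rest

def area_matches (area_path : Option String) (rules : List (String × Bool)) : Bool :=
  match area_path with
  | none => false
  | some a => if a.toList.isEmpty then false else area_matches_loop a rules

-- ===== PORT B =====
def area_matches_alt (area_path : Option String) (rules : List (String × Bool)) : Bool :=
  let exact : PySem.Set String :=
    rules.foldl (fun s r => PySem.Set.add s r.1) PySem.Set.empty
  let children : PySem.Set String :=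
    rules.foldl (fun s r => if r.2 then PySem.Set.add s r.1 else s) PySem.Set.empty
  match area_path with
  | none => false
  | some a =>
    if a.toList.isEmpty then false
    else if PySem.Set.contains exact a then true
    else (PySem.List.enumerate a.toList 0).any (fun p =>
      p.2 == '\\' && PySem.Set.contains children (String.ofList (a.toList.take p.1.toNat)))

-- ===== PRECONDITION & SPEC =====
def Spec_area_matches (area_path : Option String) (rules : List (String × Bool)) (out : Bool) : Prop := out = area_matches_alt area_path rules
instance (area_path : Option String) (rules : List (String × Bool)) (out : Bool) : Decidable (Spec_area_matches area_path rules out) := by unfold Spec_area_matches; infer_instance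

-- ===== CLAIM (what is proved, stated in full; the proofs are below) =====
def Claim_equal_area_matches : Prop := ∀ (area_path : Option String) (rules : List (String × Bool)), Dom_area_matches area_path rules → Spec_area_matches area_path rules (area_matches area_path rules)

-- ===== LEMMAS AND PROOFS =====

theorem loop_eq_any (a : String) (rules : List (String × Bool)) :
    area_matches_loop a rules
      = rules.any (fun r => a == r.1 || (r.2 && PySem.Str.startswith a (r.1 ++ "\\"))) := by
  induction rules with
  | nil => rfl
  | cons r rest ih =>
    obtain ⟨base, inc⟩ := r
    show (if a == base then true
           else if inc && PySem.Str.startswith a (base ++ "\\") then true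
           else area_matches_loop a rest) = _
    simp only [List.any_cons, ih]
    split_ifs with h1 h2
    · rw [h1]; simp
    · rw [h2]; simp
    · rw [Bool.not_eq_true] at h1 h2
      rw [h1, h2, Bool.false_or, Bool.false_or]

theorem mem_foldl_exact (a : String) (rules : List (String × Bool)) (s : PySem.Set String) :
    (a ∈ rules.foldl (fun s r => PySem.Set.add s r.1) s)
      ↔ a ∈ s ∨ ∃ r ∈ rules, a = r.1 := by
  induction rules generalizing s with
  | nil => simp
  | cons r rest ih =>
    simp only [List.foldl_cons, ih, PySem.Set.mem_add, List.mem_cons]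
    constructor
    · rintro ((h | h) | ⟨q, hq, hv⟩)
      · exact Or.inl h
      · exact Or.inr ⟨r, Or.inl rfl, h⟩
      · exact Or.inr ⟨q, Or.inr hq, hv⟩
    · rintro (h | ⟨q, (rfl | hq), hv⟩)
      · exact Or.inl (Or.inl h)
      · exact Or.inl (Or.inr hv)
      · exact Or.inr ⟨q, hq, hv⟩

theorem mem_foldl_children (a : String) (rules : List (String × Bool)) (s : PySem.Set String) :
    (a ∈ rules.foldl (fun s r => if r.2 then PySem.Set.add s r.1 else s) s)
      ↔ a ∈ s ∨ ∃ r ∈ rules, r.2 = true ∧ a = r.1 := by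
  induction rules generalizing s with
  | nil => simp
  | cons r rest ih =>
    simp only [List.foldl_cons, List.mem_cons]
    by_cases hc : r.2 = true
    · simp only [hc, if_true, ih, PySem.Set.mem_add]
      constructor
      · rintro ((h | h) | ⟨q, hq, hv⟩)
        · exact Or.inl h
        · exact Or.inr ⟨r, Or.inl rfl, hc, h⟩
        · exact Or.inr ⟨q, Or.inr hq, hv⟩
      · rintro (h | ⟨q, (rfl | hq), hv⟩)
        · exact Or.inl (Or.inl h)
        · exact Or.inl (Or.inr hv.2)
        · exact Or.inr ⟨q, hq, hv⟩
    · simp only [hc, ih]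
      constructor
      · rintro (h | ⟨q, hq, hv⟩)
        · exact Or.inl h
        · exact Or.inr ⟨q, Or.inr hq, hv⟩
      · rintro (h | ⟨q, (rfl | hq), hv⟩)
        · exact Or.inl h
        · exact absurd hv.1 hc
        · exact Or.inr ⟨q, hq, hv⟩

-- startswith(base + "\") holds iff some backslash position k of the path has base as the prefix before it
theorem prefix_backslash_iff (b cs : List Char) :
    (b ++ ['\\'] <+: cs) ↔ ∃ k, ∃ h : k < cs.length, cs[k] = '\\' ∧ cs.take k = b := by
  constructor
  · rintro ⟨t, ht⟩
    refine ⟨b.length, ?_, ?_, ?_⟩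
    · have := congrArg List.length ht; simp at this; omega
    · have : cs[b.length]? = some '\\' := by
        rw [← ht]; simp
      simpa using List.getElem?_eq_some_iff.mp this |>.2
    · rw [← ht]; simp
  · rintro ⟨k, hk, hch, rfl⟩
    have : cs.take k ++ ['\\'] = cs.take (k + 1) := by
      rw [List.take_add_one]
      simp [List.getElem?_eq_getElem hk, hch]
    rw [this]
    exact List.take_prefix _ _

theorem set_contains_iff (s : PySem.Set String) (a : String) :
    PySem.Set.contains s a = true ↔ a ∈ s := by
  simp [PySem.Set.contains]

theorem string_ofList_eq_iff (l : List Char) (s : String) :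
    String.ofList l = s ↔ l = s.toList := by
  constructor
  · rintro rfl; simp
  · intro h; subst h; simp

-- ===== VERDICT (by name: the statement is the Claim_ definition above) =====
theorem area_matches_spec : Claim_equal_area_matches := by
  intro area_path rules _
  unfold Spec_area_matches area_matches area_matches_alt
  cases area_path with
  | none => rfl
  | some a =>
    simp only
    by_cases he : a.toList.isEmpty
    · simp [he]
    · rw [Bool.not_eq_true] at he
      simp only [he, Bool.false_eq_true, if_false, loop_eq_any]
      rw [Bool.eq_iff_iff]
      simp only [Bool.if_true_left, Bool.or_eq_true, List.any_eq_true, set_contains_iff,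
        Bool.and_eq_true, beq_iff_eq,
        PySem.List.mem_enumerate_iff, mem_foldl_exact, mem_foldl_children]
      simp only [PySem.Set.empty, List.not_mem_nil, false_or, decide_eq_true_eq]
      constructor
      · rintro ⟨r, hr, hv | ⟨hc, hs⟩⟩
        · exact Or.inl ⟨r, hr, hv⟩
        · have hs' : r.1.toList ++ ['\\'] <+: a.toList := by
            rw [← PySem.Chars.startswith_iff]
            simpa using hs
          obtain ⟨k, hk, hch, htk⟩ := (prefix_backslash_iff _ _).mp hs'
          refine Or.inr ⟨((0 : Int) + k, a.toList[k]), ⟨k, hk, rfl⟩, hch, ⟨r, hr, hc, ?_⟩⟩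
          rw [string_ofList_eq_iff]
          simpa using htk
      · rintro (⟨r, hr, hv⟩ | ⟨x, ⟨k, hk, rfl⟩, hch, hmem⟩)
        · exact ⟨r, hr, Or.inl hv⟩
        · obtain ⟨r, hr, hc, hv⟩ := hmem
          refine ⟨r, hr, Or.inr ⟨hc, ?_⟩⟩
          have htk : a.toList.take k = r.1.toList := by
            simpa using (string_ofList_eq_iff _ _).mp hv
          have hp : r.1.toList ++ ['\\'] <+: a.toList :=
            (prefix_backslash_iff _ _).mpr ⟨k, hk, by simpa using hch, htk⟩
          have hsw : PySem.Chars.startswith a.toList (r.1.toList ++ ['\\']) = true :=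
            (PySem.Chars.startswith_iff _ _).mpr hp
          simpa using hsw
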